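-- pv_equiv track=rewrite | github.com/scipion-em/scipion-em-localrec | localrec/utils.py | generate_chain_id
-- ===== SOURCE A (Python) =====
-- import string
--
-- def generate_chain_id(numberOfChains):
--     """
--         Generates max 2 char chain ids (max 702 chain)
--     """
--     letters = string.ascii_uppercase
--     check = 0
--     index = 0
--     startLetter = -1
--     result_ids = []
--     for i in range(numberOfChains):
--         if index >= len(letters):
--             index = 0
--             startLetter += 1
--         if startLetter != -1:
--             result_ids.append(letters[startLetter]+letters[index])
--         else:
--             result_ids.append(letters[index])
--         index +=1
--
--     return result_ids
-- ===== SOURCE B (Python) =====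
-- import string
--
-- def generate_chain_id(numberOfChains):
--     """
--         Generates max 2 char chain ids (max 702 chain)
--     """
--     letters = string.ascii_uppercase
--     result_ids = []
--     for i in range(numberOfChains):
--         if i < 26:
--             result_ids.append(letters[i])
--         else:
--             k = i - 26
--             result_ids.append(letters[k // 26] + letters[k % 26])
--     return result_ids
-- ===== Notes on version B (the rewrite author's own statement) =====
-- stated objective: simpler
-- what changed: Replaced the carried index/startLetter mutable state with a stateless closed-form divmod computation per position: element i is letters[i] for i<26, else letters[(i-26)//26]+letters[(i-26)%26].
import Mathlib
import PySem

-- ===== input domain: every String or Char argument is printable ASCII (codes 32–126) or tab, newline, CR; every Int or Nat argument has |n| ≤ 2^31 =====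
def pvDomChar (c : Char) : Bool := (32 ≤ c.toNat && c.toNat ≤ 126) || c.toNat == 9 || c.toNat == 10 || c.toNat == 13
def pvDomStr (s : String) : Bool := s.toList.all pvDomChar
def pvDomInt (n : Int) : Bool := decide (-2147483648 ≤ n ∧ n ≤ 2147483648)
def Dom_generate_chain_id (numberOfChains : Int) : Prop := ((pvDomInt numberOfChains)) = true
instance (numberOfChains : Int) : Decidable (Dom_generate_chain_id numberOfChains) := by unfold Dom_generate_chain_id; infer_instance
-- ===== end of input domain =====

-- B replaces A's carried index/startLetter counters with a stateless per-position
-- divmod closed form (objective: simpler); return values agree on all numberOfChains ≤ 702.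

-- ===== PORT A =====
-- letters = string.ascii_uppercase; letters[i]. Exact for 0 ≤ i < 26 (all accesses under
-- Pre_); the .getD default is never reached under Pre_ (Python raises IndexError outside,
-- excluded by Pre_).
def pvLetter (i : Int) : Char :=
  (PySem.Str.pyGet? "ABCDEFGHIJKLMNOPQRSTUVWXYZ" i).getD 'A'

-- one iteration of A's for-loop body; state = (index, startLetter, result_ids)
def pvStepA (s : Int × Int × List String) (_i : Int) : Int × Int × List String :=
  let (index, startLetter, res) := s
  let (index, startLetter) :=
    if index ≥ 26 then (0, startLetter + 1) else (index, startLetter)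
  let res :=
    if startLetter ≠ -1 then res ++ [String.ofList [pvLetter startLetter, pvLetter index]]
    else res ++ [String.ofList [pvLetter index]]
  (index + 1, startLetter, res)

def generate_chain_id (numberOfChains : Int) : List String :=
  ((PySem.List.pyRange 0 numberOfChains 1).foldl pvStepA (0, -1, [])).2.2

-- ===== PORT B =====
def generate_chain_id_alt (numberOfChains : Int) : List String :=
  (PySem.List.pyRange 0 numberOfChains 1).map (fun i =>
    if i < 26 then String.ofList [pvLetter i]
    else
      let k := i - 26
      String.ofList [pvLetter (PySem.Int.floordiv k 26), pvLetter (PySem.Int.mod k 26)])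

-- ===== PRECONDITION & SPEC =====
-- Python A (and B) raises IndexError once 702 ids are exhausted: excluded here.
def Pre_generate_chain_id (numberOfChains : Int) : Prop := numberOfChains ≤ 702
instance (numberOfChains : Int) : Decidable (Pre_generate_chain_id numberOfChains) := by
  unfold Pre_generate_chain_id; infer_instance

def pvWitness_generate_chain_id : Int := (30)

def Spec_generate_chain_id (numberOfChains : Int) (out : List String) : Prop :=
  out = generate_chain_id_alt numberOfChains
instance (numberOfChains : Int) (out : List String) : Decidable (Spec_generate_chain_id numberOfChains out) := by
  unfold Spec_generate_chain_id; infer_instance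

-- ===== CLAIM (what is proved, stated in full; the proofs are below) =====
def Claim_equal_generate_chain_id : Prop := ∀ (numberOfChains : Int), Dom_generate_chain_id numberOfChains → Pre_generate_chain_id numberOfChains → Spec_generate_chain_id numberOfChains (generate_chain_id numberOfChains)

-- ===== LEMMAS AND PROOFS =====

-- state of A's loop at the START of iteration n (n iterations already done)
def pvPostIdx (n : Int) : Int :=
  if n = 0 then 0
  else if n - 1 < 26 then (n - 1) + 1 else PySem.Int.mod (n - 1 - 26) 26 + 1

def pvPostSl (n : Int) : Int :=
  if n = 0 then -1
  else if n - 1 < 26 then -1 else PySem.Int.floordiv (n - 1 - 26) 26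

lemma pvStepA_eq (n : Int) (h0 : 0 ≤ n) (h : n ≤ 701) (L : List String) :
    pvStepA (pvPostIdx n, pvPostSl n, L) n =
      (pvPostIdx (n + 1), pvPostSl (n + 1),
       L ++ [if n < 26 then String.ofList [pvLetter n]
             else
               let k := n - 26
               String.ofList [pvLetter (PySem.Int.floordiv k 26), pvLetter (PySem.Int.mod k 26)]]) := by
  have h26 : (0:Int) < 26 := by norm_num
  simp only [pvStepA, pvPostIdx, pvPostSl,
    PySem.Int.mod_eq_emod_of_pos h26, PySem.Int.floordiv_eq_ediv_of_pos h26]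
  split_ifs <;>
    simp only [Prod.mk.injEq, List.append_cancel_left_eq, List.cons.injEq, and_true, true_and] <;>
    and_intros <;>
    first
    | omega
    | exact congrArg pvLetter (by omega)
    | (congr 1 <;> first
        | omega
        | exact congrArg pvLetter (by omega)
        | (congr 1 <;> first
            | omega
            | exact congrArg pvLetter (by omega)
            | (congr 1 <;> first | omega | exact congrArg pvLetter (by omega))))

lemma pvLoop (m : Nat) (h : m ≤ 702) :
    (PySem.List.pyRange 0 (m : Int) 1).foldl pvStepA (0, -1, ([] : List String)) =
      (pvPostIdx m, pvPostSl m, generate_chain_id_alt (m : Int)) := by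
  induction m with
  | zero => simp [PySem.List.pyRange_one_eq_nil, pvPostIdx, pvPostSl, generate_chain_id_alt]
  | succ k ih =>
    have hk : (k : Int) ≤ 701 := by have : k ≤ 701 := by omega
                                    exact_mod_cast this
    have hk0 : (0 : Int) ≤ (k : Int) := Int.natCast_nonneg k
    have hsplit : PySem.List.pyRange 0 ((k + 1 : Nat) : Int) 1
        = PySem.List.pyRange 0 (k : Int) 1 ++ [(k : Int)] := by
      have := PySem.List.pyRange_one_succ_right (a := 0) (b := (k : Int)) hk0
      push_cast
      simpa using this
    rw [hsplit, List.foldl_append, ih (by omega), List.foldl_cons, List.foldl_nil,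
      pvStepA_eq (k : Int) hk0 hk]
    simp only [generate_chain_id_alt, hsplit, List.map_append, List.map_cons, List.map_nil]
    push_cast
    rfl

-- ===== VERDICT (by name: the statement is the Claim_ definition above) =====
theorem generate_chain_id_spec : Claim_equal_generate_chain_id := by
  intro n _hdom hpre
  unfold Spec_generate_chain_id generate_chain_id
  by_cases hn : n ≤ 0
  · rw [PySem.List.pyRange_one_eq_nil (by omega)]
    simp [generate_chain_id_alt, PySem.List.pyRange_one_eq_nil (by omega : n ≤ 0)]
  · have hn' : n = ((n.toNat : Nat) : Int) := by omega
    rw [hn', pvLoop n.toNat (by unfold Pre_generate_chain_id at hpre; omega)]
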